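-- pv_equiv track=rewrite | github.com/miliar/Code_Jam_Webscraper | solutions_python/Problem_157/440.py | q
-- ===== SOURCE A (Python) =====
-- grid = [('1','1','+1'),('1','i','+i'),('1','j','+j'),('1','k','+k'),
-- 		('i','1','+i'),('i','i','-1'),('i','j','-k'),('i','k','+j'),
-- 		('j','1','+j'),('j','i','+k'),('j','j','-1'),('j','k','-i'),
-- 		('k','1','+k'),('k','i','-j'),('k','j','+i'),('k','k','-1')]
--
-- def q(a,b):
-- 	flip = 0
-- 	if a[0] == "-":
-- 		flip = 1-flip
-- 	if b[0] == "-":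
-- 		flip = 1-flip
-- 	r = None
-- 	for (ar,br,cr) in grid:
-- 		if a[1]==br and b[1]==ar:
-- 			r = cr
-- 			break
-- 	assert r != None
-- 	if flip:
-- 		if r[0] == '+':
-- 			return '-'+r[1]
-- 		if r[0] == '-':
-- 			return '+'+r[1]
-- 	else:
-- 		return r
-- ===== SOURCE B (Python) =====
-- # Arithmetic quaternion-unit multiply: indices 0..3 (1,i,j,k), cyclic rule
-- # instead of scanning the 16-row lookup table.
-- UNIT = {'1': 0, 'i': 1, 'j': 2, 'k': 3}
-- SYM = '1ijk'
--
-- def q(a, b):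
--     x = UNIT[a[1]]
--     y = UNIT[b[1]]
--     neg = (a[0] == '-') != (b[0] == '-')
--     if x == 0 or y == 0:
--         u = x + y
--     elif x == y:
--         u = 0
--         neg = not neg
--     else:
--         u = 6 - x - y
--         if y != x % 3 + 1:
--             neg = not neg
--     return ('-' if neg else '+') + SYM[u]
-- ===== Notes on version B (the rewrite author's own statement) =====
-- stated objective: alternative
-- what changed: B replaces A's linear scan of the 16-row lookup table with arithmetic on unit indices (0..3): cyclic quaternion rules compute the product unit and its sign, combined with the XOR of the operands' leading '-' signs.
import Mathlib
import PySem

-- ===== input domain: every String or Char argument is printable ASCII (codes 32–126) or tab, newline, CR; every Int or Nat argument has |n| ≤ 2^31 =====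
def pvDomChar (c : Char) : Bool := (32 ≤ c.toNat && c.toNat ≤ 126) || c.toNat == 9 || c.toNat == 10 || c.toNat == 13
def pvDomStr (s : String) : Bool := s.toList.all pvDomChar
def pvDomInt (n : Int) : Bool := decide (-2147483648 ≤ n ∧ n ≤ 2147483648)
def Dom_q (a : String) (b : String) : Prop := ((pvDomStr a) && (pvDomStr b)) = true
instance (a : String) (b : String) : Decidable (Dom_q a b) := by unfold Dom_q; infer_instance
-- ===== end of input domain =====

-- B replaces A's 16-row table scan with arithmetic on unit indices (idiomatic/alternative).

-- ===== PORT A =====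
def grid : List (Char × Char × String) :=
  [('1','1',"+1"),('1','i',"+i"),('1','j',"+j"),('1','k',"+k"),
   ('i','1',"+i"),('i','i',"-1"),('i','j',"-k"),('i','k',"+j"),
   ('j','1',"+j"),('j','i',"+k"),('j','j',"-1"),('j','k',"-i"),
   ('k','1',"+k"),('k','i',"-j"),('k','j',"+i"),('k','k',"-1")]

-- literal port of A; where the Python raises (IndexError on short strings, the
-- failed assert on an unknown unit) the port returns "" — those inputs are outside Pre_q
def q (a : String) (b : String) : String :=
  let flip : Int := 0
  let flip : Int := if PySem.Str.pyGet? a 0 = some '-' then 1 - flip else flip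
  let flip : Int := if PySem.Str.pyGet? b 0 = some '-' then 1 - flip else flip
  let r : Option String :=
    (grid.find? (fun t => PySem.Str.pyGet? a 1 == some t.2.1 && PySem.Str.pyGet? b 1 == some t.1)).map (·.2.2)
  match r with
  | none => ""                    -- assert r != None fails: Python raises AssertionError
  | some r =>
    if flip ≠ 0 then
      if PySem.Str.pyGet? r 0 = some '+' then
        String.ofList ['-', (PySem.Str.pyGet? r 1).getD ' ']
      else if PySem.Str.pyGet? r 0 = some '-' then
        String.ofList ['+', (PySem.Str.pyGet? r 1).getD ' ']
      else ""                     -- unreachable: every grid result starts with '+'/'-'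
    else r

-- ===== PORT B =====
def pvUNIT : PySem.Dict Char Int := PySem.Dict.ofList [('1', 0), ('i', 1), ('j', 2), ('k', 3)]
def pvSYM : String := "1ijk"

def q_alt (a : String) (b : String) : String :=
  match (PySem.Str.pyGet? a 1).bind (fun c => pvUNIT.get? c),
        (PySem.Str.pyGet? b 1).bind (fun c => pvUNIT.get? c) with
  | some x, some y =>
    let neg : Bool := decide ((PySem.Str.pyGet? a 0 = some '-') ≠ (PySem.Str.pyGet? b 0 = some '-'))  -- Python's != on two bools
    let (u, neg) : Int × Bool :=
      if x == 0 || y == 0 then (x + y, neg)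
      else if x == y then (0, !neg)
      else (6 - x - y, if y != PySem.Int.mod x 3 + 1 then !neg else neg)
    String.ofList [(if neg then '-' else '+'), (PySem.Str.pyGet? pvSYM u).getD ' ']
  | _, _ => ""                    -- KeyError / IndexError in Python; outside Pre_q

-- ===== PRECONDITION & SPEC =====
-- Pre_q admits exactly the inputs A returns on: both strings reach index 1 and
-- carry a recognised unit there (otherwise A raises IndexError/AssertionError).
def Pre_q (a : String) (b : String) : Prop :=
  PySem.Str.pyGet? a 1 ∈ [some '1', some 'i', some 'j', some 'k'] ∧
  PySem.Str.pyGet? b 1 ∈ [some '1', some 'i', some 'j', some 'k']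
instance (a : String) (b : String) : Decidable (Pre_q a b) := by unfold Pre_q; infer_instance
def pvWitness_q : String × String := ("+i", "-j")
def Spec_q (a : String) (b : String) (out : String) : Prop := out = q_alt a b
instance (a : String) (b : String) (out : String) : Decidable (Spec_q a b out) := by unfold Spec_q; infer_instance

-- ===== CLAIM (what is proved, stated in full; the proofs are below) =====
def Claim_equal_q : Prop := ∀ (a : String) (b : String), Dom_q a b → Pre_q a b → Spec_q a b (q a b)

-- ===== LEMMAS AND PROOFS =====
theorem q_key (a b : String) (ca cb : Char)
    (ha : PySem.Str.pyGet? a 1 = some ca) (hb : PySem.Str.pyGet? b 1 = some cb)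
    (hca : ca ∈ (['1','i','j','k'] : List Char)) (hcb : cb ∈ (['1','i','j','k'] : List Char)) :
    q a b = q_alt a b := by
  have hsa' : (PySem.Str.pyGet? a 0 = some '-') ∨ ¬ (PySem.Str.pyGet? a 0 = some '-') := em _
  have hsb' : (PySem.Str.pyGet? b 0 = some '-') ∨ ¬ (PySem.Str.pyGet? b 0 = some '-') := em _
  fin_cases hca <;> fin_cases hcb <;>
  rcases hsa' with hsa | hsa <;> rcases hsb' with hsb | hsb <;>
  · simp only [q, q_alt, ha, hb, hsa, hsb]
    decide

-- ===== VERDICT (by name: the statement is the Claim_ definition above) =====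
theorem q_spec : Claim_equal_q := by
  intro a b _ hpre
  rcases hpre with ⟨hpa, hpb⟩
  unfold Spec_q
  simp only [List.mem_cons, List.not_mem_nil, or_false] at hpa hpb
  rcases hpa with ha | ha | ha | ha <;> rcases hpb with hb | hb | hb | hb <;>
    exact q_key a b _ _ ha hb (by simp) (by simp)
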